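-- pv_equiv track=rewrite | github.com/i-m-samarth-cs/Python-Programs | Sixth.py | simulate_band
-- ===== SOURCE A (Python) =====
-- def simulate_band(start, moves, size):
--     """Simulate the band placement and return a list of occupied cells with their positions."""
--     directions = {'u': (0, -1, 0), 'd': (0, 1, 0),
--                   'f': (1, 0, 0), 'b': (-1, 0, 0),
--                   'r': (0, 0, 1), 'l': (0, 0, -1)}
--     cells = []
--     x, y, z = start
--     cells.append((x, y, z))  # Add the starting position
--     for move in moves:
--         dx, dy, dz = directions[move]
--         x, y, z = x + dx, y + dy, z + dz
--         if 0 <= x < size and 0 <= y < size and 0 <= z < size: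
--             cells.append((x, y, z))
--     return cells
-- ===== SOURCE B (Python) =====
-- def simulate_band(start, moves, size):
--     """Simulate the band placement and return a list of occupied cells with their positions."""
--     # Structure-of-arrays: each axis's coordinates are prefix-summed independently.
--     dxs = {'u': 0, 'd': 0, 'f': 1, 'b': -1, 'r': 0, 'l': 0}
--     dys = {'u': -1, 'd': 1, 'f': 0, 'b': 0, 'r': 0, 'l': 0}
--     dzs = {'u': 0, 'd': 0, 'f': 0, 'b': 0, 'r': 1, 'l': -1}
--     xs = [start[0]]
--     for m in moves:
--         xs.append(xs[-1] + dxs[m])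
--     ys = [start[1]]
--     for m in moves:
--         ys.append(ys[-1] + dys[m])
--     zs = [start[2]]
--     for m in moves:
--         zs.append(zs[-1] + dzs[m])
--     # Rebuild positions by zipping the axes; the start cell is kept unconditionally.
--     cells = [(xs[0], ys[0], zs[0])]
--     for x, y, z in zip(xs[1:], ys[1:], zs[1:]):
--         if 0 <= x < size and 0 <= y < size and 0 <= z < size:
--             cells.append((x, y, z))
--     return cells
-- ===== Notes on version B (the rewrite author's own statement) =====
-- stated objective: alternative
-- what changed: B uses a structure-of-arrays decomposition: it prefix-sums each axis's deltas in three independent passes into coordinate lists, then zips them back into positions and filters the post-start ones for bounds, instead of A's single fused loop over one (x,y,z) state.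
import Mathlib
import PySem

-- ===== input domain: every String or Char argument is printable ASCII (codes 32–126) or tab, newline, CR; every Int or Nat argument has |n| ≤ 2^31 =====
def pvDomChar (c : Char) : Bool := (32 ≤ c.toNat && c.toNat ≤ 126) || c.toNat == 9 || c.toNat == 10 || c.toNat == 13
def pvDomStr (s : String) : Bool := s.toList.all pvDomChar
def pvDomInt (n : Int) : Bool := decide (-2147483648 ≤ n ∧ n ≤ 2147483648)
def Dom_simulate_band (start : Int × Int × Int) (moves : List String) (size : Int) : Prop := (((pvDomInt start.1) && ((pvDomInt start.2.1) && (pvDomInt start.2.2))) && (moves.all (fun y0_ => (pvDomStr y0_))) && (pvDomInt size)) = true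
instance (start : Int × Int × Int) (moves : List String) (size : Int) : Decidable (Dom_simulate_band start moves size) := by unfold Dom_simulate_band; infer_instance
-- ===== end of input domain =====

-- B uses a structure-of-arrays decomposition (three independent per-axis prefix-sum passes,
-- then zip + bounds filter) where A walks one fused loop over a single (x,y,z) state; same cost.

-- ===== PORT A =====
-- the `directions` dict lookup; `none` = KeyError (excluded by Pre_simulate_band)
def pvDir (m : String) : Option (Int × Int × Int) :=
  if m = "u" then some (0, -1, 0)
  else if m = "d" then some (0, 1, 0)
  else if m = "f" then some (1, 0, 0)
  else if m = "b" then some (-1, 0, 0)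
  else if m = "r" then some (0, 0, 1)
  else if m = "l" then some (0, 0, -1)
  else none

-- A: one fused loop over moves, state = current position × collected cells.
def simulate_band (start : Int × Int × Int) (moves : List String) (size : Int) : List (Int × Int × Int) :=
  (moves.foldl
    (fun (st : (Int × Int × Int) × List (Int × Int × Int)) move =>
      match pvDir move with
      | none => st          -- Python raises KeyError here; Pre_ excludes it
      | some (dx, dy, dz) =>
        let x := st.1.1 + dx
        let y := st.1.2.1 + dy
        let z := st.1.2.2 + dz
        if 0 ≤ x ∧ x < size ∧ 0 ≤ y ∧ y < size ∧ 0 ≤ z ∧ z < size then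
          ((x, y, z), st.2 ++ [(x, y, z)])
        else ((x, y, z), st.2))
    (start, [start])).2

-- ===== PORT B =====
-- B's three per-axis delta dicts; `none` = KeyError (excluded by Pre_simulate_band)
def pvDx (m : String) : Option Int :=
  if m = "u" then some 0 else if m = "d" then some 0
  else if m = "f" then some 1 else if m = "b" then some (-1)
  else if m = "r" then some 0 else if m = "l" then some 0 else none
def pvDy (m : String) : Option Int :=
  if m = "u" then some (-1) else if m = "d" then some 1
  else if m = "f" then some 0 else if m = "b" then some 0
  else if m = "r" then some 0 else if m = "l" then some 0 else none
def pvDz (m : String) : Option Int :=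
  if m = "u" then some 0 else if m = "d" then some 0
  else if m = "f" then some 0 else if m = "b" then some 0
  else if m = "r" then some 1 else if m = "l" then some (-1) else none

-- one per-axis prefix-sum pass: `xs = [s]; for m in moves: xs.append(xs[-1] + d[m])`
-- (`xs[-1]` ported as getLast?, the list is never empty)
def pvAxis (s : Int) (d : String → Option Int) (moves : List String) : List Int :=
  moves.foldl
    (fun xs m =>
      match d m with
      | none => xs          -- Python raises KeyError here; Pre_ excludes it
      | some dv =>
        match xs.getLast? with
        | none => xs        -- unreachable: xs starts nonempty
        | some last => xs ++ [last + dv])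
    [s]

def simulate_band_alt (start : Int × Int × Int) (moves : List String) (size : Int) : List (Int × Int × Int) :=
  let xs := pvAxis start.1 pvDx moves
  let ys := pvAxis start.2.1 pvDy moves
  let zs := pvAxis start.2.2 pvDz moves
  -- `cells = [(xs[0], ys[0], zs[0])]` (lists are nonempty, so headD's default is never used),
  -- then the zip loop appending in-bounds positions
  (List.zip (xs.drop 1) (List.zip (ys.drop 1) (zs.drop 1))).foldl
    (fun acc p =>
      if 0 ≤ p.1 ∧ p.1 < size ∧ 0 ≤ p.2.1 ∧ p.2.1 < size ∧ 0 ≤ p.2.2 ∧ p.2.2 < size then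
        acc ++ [p]
      else acc)
    [(xs.headD 0, ys.headD 0, zs.headD 0)]

-- ===== PRECONDITION & SPEC =====
-- Pre_ excludes exactly the moves lists containing a string that is no key of the
-- direction dicts, on which Python A raises KeyError.
def Pre_simulate_band (start : Int × Int × Int) (moves : List String) (size : Int) : Prop :=
  ∀ m ∈ moves, m ∈ (["u", "d", "f", "b", "r", "l"] : List String)
instance (start : Int × Int × Int) (moves : List String) (size : Int) : Decidable (Pre_simulate_band start moves size) := by unfold Pre_simulate_band; infer_instance

def pvWitness_simulate_band : (Int × Int × Int) × List String × Int := ((0, 0, 0), ["r", "d", "u", "l"], 3)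

def Spec_simulate_band (start : Int × Int × Int) (moves : List String) (size : Int) (out : List (Int × Int × Int)) : Prop := out = simulate_band_alt start moves size
instance (start : Int × Int × Int) (moves : List String) (size : Int) (out : List (Int × Int × Int)) : Decidable (Spec_simulate_band start moves size out) := by unfold Spec_simulate_band; infer_instance

-- ===== CLAIM (what is proved, stated in full; the proofs are below) =====
def Claim_equal_simulate_band : Prop := ∀ (start : Int × Int × Int) (moves : List String) (size : Int), Dom_simulate_band start moves size → Pre_simulate_band start moves size → Spec_simulate_band start moves size (simulate_band start moves size)

-- ===== LEMMAS AND PROOFS =====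

-- reference recursion: filtered cells after the start, A-style
def pvRun (pos : Int × Int × Int) (moves : List String) (size : Int) : List (Int × Int × Int) :=
  match moves with
  | [] => []
  | m :: rest =>
    match pvDir m with
    | none => pvRun pos rest size
    | some (dx, dy, dz) =>
      let p := (pos.1 + dx, pos.2.1 + dy, pos.2.2 + dz)
      if 0 ≤ p.1 ∧ p.1 < size ∧ 0 ≤ p.2.1 ∧ p.2.1 < size ∧ 0 ≤ p.2.2 ∧ p.2.2 < size then
        p :: pvRun p rest size
      else pvRun p rest size

-- reference recursion: unfiltered 3D trajectory after the start
def pvTraj (pos : Int × Int × Int) (moves : List String) : List (Int × Int × Int) :=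
  match moves with
  | [] => []
  | m :: rest =>
    match pvDir m with
    | none => pvTraj pos rest
    | some (dx, dy, dz) =>
      let p := (pos.1 + dx, pos.2.1 + dy, pos.2.2 + dz)
      p :: pvTraj p rest

-- reference recursion: one axis's trajectory after the start
def pvAxisT (s : Int) (d : String → Option Int) (moves : List String) : List Int :=
  match moves with
  | [] => []
  | m :: rest =>
    match d m with
    | none => pvAxisT s d rest
    | some dv => (s + dv) :: pvAxisT (s + dv) d rest

theorem pvFoldA_eq (moves : List String) (size : Int) :
    ∀ (pos : Int × Int × Int) (acc : List (Int × Int × Int)),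
    (moves.foldl
      (fun (st : (Int × Int × Int) × List (Int × Int × Int)) move =>
        match pvDir move with
        | none => st
        | some (dx, dy, dz) =>
          let x := st.1.1 + dx
          let y := st.1.2.1 + dy
          let z := st.1.2.2 + dz
          if 0 ≤ x ∧ x < size ∧ 0 ≤ y ∧ y < size ∧ 0 ≤ z ∧ z < size then
            ((x, y, z), st.2 ++ [(x, y, z)])
          else ((x, y, z), st.2))
      (pos, acc)).2 = acc ++ pvRun pos moves size := by
  induction moves with
  | nil => intro pos acc; simp [pvRun]
  | cons m rest ih =>
    intro pos acc
    simp only [List.foldl_cons, pvRun]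
    cases h : pvDir m with
    | none => simpa [h] using ih pos acc
    | some d =>
      obtain ⟨dx, dy, dz⟩ := d
      by_cases hb : 0 ≤ pos.1 + dx ∧ pos.1 + dx < size ∧ 0 ≤ pos.2.1 + dy ∧ pos.2.1 + dy < size ∧ 0 ≤ pos.2.2 + dz ∧ pos.2.2 + dz < size
      · simpa [h, hb] using ih (pos.1 + dx, pos.2.1 + dy, pos.2.2 + dz) (acc ++ [(pos.1 + dx, pos.2.1 + dy, pos.2.2 + dz)])
      · simpa [h, hb] using ih (pos.1 + dx, pos.2.1 + dy, pos.2.2 + dz) acc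

theorem pvRun_eq_filter (moves : List String) (size : Int) :
    ∀ (pos : Int × Int × Int),
    pvRun pos moves size
      = (pvTraj pos moves).filter
          (fun p => decide (0 ≤ p.1 ∧ p.1 < size ∧ 0 ≤ p.2.1 ∧ p.2.1 < size ∧ 0 ≤ p.2.2 ∧ p.2.2 < size)) := by
  induction moves with
  | nil => intro pos; simp [pvRun, pvTraj]
  | cons m rest ih =>
    intro pos
    simp only [pvRun, pvTraj]
    cases h : pvDir m with
    | none => simpa using ih pos
    | some d =>
      obtain ⟨dx, dy, dz⟩ := d
      by_cases hb : 0 ≤ pos.1 + dx ∧ pos.1 + dx < size ∧ 0 ≤ pos.2.1 + dy ∧ pos.2.1 + dy < size ∧ 0 ≤ pos.2.2 + dz ∧ pos.2.2 + dz < size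
      · simp [hb, ih]
      · simp [hb, List.filter_cons, ih]

-- B's per-axis dicts are the components of A's direction dict
theorem pvAxes (m : String) :
    pvDx m = (pvDir m).map Prod.fst ∧ pvDy m = (pvDir m).map (fun p => p.2.1)
      ∧ pvDz m = (pvDir m).map (fun p => p.2.2) := by
  unfold pvDx pvDy pvDz pvDir
  split_ifs <;> simp

theorem pvAxisFold_eq (d : String → Option Int) (moves : List String) :
    ∀ (pre : List Int) (s : Int),
    (moves.foldl
      (fun xs m =>
        match d m with
        | none => xs
        | some dv =>
          match xs.getLast? with
          | none => xs
          | some last => xs ++ [last + dv])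
      (pre ++ [s])) = (pre ++ [s]) ++ pvAxisT s d moves := by
  induction moves with
  | nil => intro pre s; simp [pvAxisT]
  | cons m rest ih =>
    intro pre s
    simp only [List.foldl_cons, pvAxisT]
    cases h : d m with
    | none => simpa [h] using ih pre s
    | some dv =>
      have := ih (pre ++ [s]) (s + dv)
      simp only [List.getLast?_concat, h]
      simpa using this

theorem pvAxis_eq (s : Int) (d : String → Option Int) (moves : List String) :
    pvAxis s d moves = s :: pvAxisT s d moves := by
  have := pvAxisFold_eq d moves [] s
  simpa [pvAxis] using this

theorem pvZip_traj (moves : List String) :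
    ∀ (s1 s2 s3 : Int),
    List.zip (pvAxisT s1 pvDx moves) (List.zip (pvAxisT s2 pvDy moves) (pvAxisT s3 pvDz moves))
      = pvTraj (s1, s2, s3) moves := by
  induction moves with
  | nil => intro s1 s2 s3; simp [pvAxisT, pvTraj]
  | cons m rest ih =>
    intro s1 s2 s3
    obtain ⟨hx, hy, hz⟩ := pvAxes m
    simp only [pvAxisT, pvTraj, hx, hy, hz]
    cases h : pvDir m with
    | none => simpa using ih s1 s2 s3
    | some dd =>
      obtain ⟨dx, dy, dz⟩ := dd
      simpa [List.zip] using ih (s1 + dx) (s2 + dy) (s3 + dz)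

-- ===== VERDICT (by name: the statement is the Claim_ definition above) =====
theorem simulate_band_spec : Claim_equal_simulate_band := by
  intro start moves size _ _
  unfold Spec_simulate_band simulate_band simulate_band_alt
  rw [pvFoldA_eq, pvAxis_eq, pvAxis_eq, pvAxis_eq]
  simp only [List.drop_succ_cons, List.drop_zero, List.headD_cons]
  rw [pvZip_traj]
  rw [PySem.List.foldl_append_ite_eq_filter]
  simp [pvRun_eq_filter]
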